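-- pv_equiv track=rewrite | github.com/pypi-data/pypi-mirror-9 | packages/sterch.scrapingtools/sterch.scrapingtools-0.7.2.tar.gz/sterch.scrapingtools-0.7.2/src/sterch/scrapingtools/text.py | remove_aka
-- ===== SOURCE A (Python) =====
-- def remove_aka(fullname):
--     """ Removes AKA from the fullname given """
--     fu = fullname.upper()
--     for aka in (" AKA ", "A.K.A.", "A.K.A", "A/K/A", "(ALSO KNOWN AS)", "ALSO KNOWN AS", " A K A ", 'A. K. A.',
--                 " FKA ", "F.K.A.", "F.K.A", "F/K/A", "(FORMERLY KNOWN AS)", "FORMERLY KNOWN AS", " F K A ", 'F. K. A.',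
--                 " DBA ", "D.B.A.", "D/B/A", "(DOING BUSINESS AS)", "DOING BUSINESS AS", " D B A ", 'D. B. A.',
--                 'IN HER OFFICIAL CAPACITY', 'IN HIS OFFICIAL CAPACITY', 'IN HER CAPACITY', 'IN HIS CAPACITY'):
--         if aka in fu:
--             fu = fu.split(aka,1)[0]
--     return fu.strip()
-- ===== SOURCE B (Python) =====
-- _MARKERS = (" AKA ", "A.K.A.", "A.K.A", "A/K/A", "(ALSO KNOWN AS)", "ALSO KNOWN AS", " A K A ", 'A. K. A.',
--             " FKA ", "F.K.A.", "F.K.A", "F/K/A", "(FORMERLY KNOWN AS)", "FORMERLY KNOWN AS", " F K A ", 'F. K. A.',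
--             " DBA ", "D.B.A.", "D/B/A", "(DOING BUSINESS AS)", "DOING BUSINESS AS", " D B A ", 'D. B. A.',
--             'IN HER OFFICIAL CAPACITY', 'IN HIS OFFICIAL CAPACITY', 'IN HER CAPACITY', 'IN HIS CAPACITY')
--
-- def remove_aka(fullname):
--     """ Removes AKA from the fullname given """
--     u = fullname.upper()
--     # Only a marker's FIRST occurrence in the whole string can ever become the cut
--     # point, so locate each marker once and fold over those positions.
--     hits = [(u.find(m), len(m)) for m in _MARKERS]
--     end = len(u)
--     for i, w in hits:
--         if i != -1 and i + w <= end: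
--             end = i
--     return u[:end].strip()
-- ===== Notes on version B (the rewrite author's own statement) =====
-- stated objective: alternative
-- what changed: Instead of repeatedly truncating the string and rescanning the shrunken copy for each marker, B locates each marker's first occurrence in the full upper-cased string once (u.find) and folds over those fixed positions, cutting the end index when an occurrence fits before it; this rests on the fact that only a marker's first global occurrence can ever become the cut point.
import Mathlib
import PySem

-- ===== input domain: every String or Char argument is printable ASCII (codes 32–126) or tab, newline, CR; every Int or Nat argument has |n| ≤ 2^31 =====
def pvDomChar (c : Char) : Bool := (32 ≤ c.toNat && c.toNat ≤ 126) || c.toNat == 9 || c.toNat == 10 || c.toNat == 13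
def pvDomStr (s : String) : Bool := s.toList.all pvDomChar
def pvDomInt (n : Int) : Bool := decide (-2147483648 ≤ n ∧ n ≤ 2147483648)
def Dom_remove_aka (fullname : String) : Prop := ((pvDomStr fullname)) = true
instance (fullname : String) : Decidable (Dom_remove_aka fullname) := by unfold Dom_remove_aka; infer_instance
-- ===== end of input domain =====

-- B replaces A's truncate-and-rescan loop by locating each marker's first occurrence
-- in the full string once and folding over those cut positions (alternative decomposition).

-- the module-level tuple of alias markers (shared verbatim by A and B)
def akaMarkers : List String := [" AKA ", "A.K.A.", "A.K.A", "A/K/A", "(ALSO KNOWN AS)", "ALSO KNOWN AS", " A K A ", "A. K. A.",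
  " FKA ", "F.K.A.", "F.K.A", "F/K/A", "(FORMERLY KNOWN AS)", "FORMERLY KNOWN AS", " F K A ", "F. K. A.",
  " DBA ", "D.B.A.", "D/B/A", "(DOING BUSINESS AS)", "DOING BUSINESS AS", " D B A ", "D. B. A.",
  "IN HER OFFICIAL CAPACITY", "IN HIS OFFICIAL CAPACITY", "IN HER CAPACITY", "IN HIS CAPACITY"]

-- ===== PORT A =====
def remove_aka (fullname : String) : String :=
  let fu0 := PySem.Str.upper fullname
  let fu1 := akaMarkers.foldl (fun fu aka =>
    if PySem.Str.isIn aka fu = true then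
      -- fu.split(aka, 1)[0]: aka is a nonempty literal, so the split is a nonempty list
      match PySem.Str.splitMax? fu aka 1 with
      | some (p :: _) => p
      | _ => ""      -- unreachable
    else fu) fu0
  PySem.Str.strip fu1

-- ===== PORT B =====
def remove_aka_alt (fullname : String) : String :=
  let u := PySem.Str.upper fullname
  let hits := akaMarkers.map (fun m => (PySem.Str.find u m, PySem.Str.len m))
  let e := hits.foldl (fun e iw => if iw.1 ≠ -1 ∧ iw.1 + iw.2 ≤ e then iw.1 else e)
    (PySem.Str.len u)
  PySem.Str.strip (PySem.Str.slice u none (some e))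

-- ===== PRECONDITION & SPEC =====
def Spec_remove_aka (fullname : String) (out : String) : Prop := out = remove_aka_alt fullname
instance (fullname : String) (out : String) : Decidable (Spec_remove_aka fullname out) := by unfold Spec_remove_aka; infer_instance

-- ===== CLAIM (what is proved, stated in full; the proofs are below) =====
def Claim_equal_remove_aka : Prop := ∀ (fullname : String), Dom_remove_aka fullname → Spec_remove_aka fullname (remove_aka fullname)

-- ===== LEMMAS AND PROOFS =====

-- An occurrence inside the prefix `u.take e` is an occurrence in `u` that ends by `e`.
theorem pv_prefix_take_drop (u m : List Char) (e j : Nat) (hm : m ≠ []) :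
    m <+: (u.take e).drop j ↔ (m <+: u.drop j ∧ j + m.length ≤ e) := by
  have hlen : 0 < m.length := List.length_pos_iff.mpr hm
  rw [List.drop_take, List.prefix_take_iff]
  constructor
  · rintro ⟨h1, h2⟩; exact ⟨h1, by omega⟩
  · rintro ⟨h1, h2⟩; exact ⟨h1, by omega⟩

-- infix as "prefix of some drop"
theorem pv_infix_iff (sub s : List Char) : sub <:+: s ↔ ∃ j, sub <+: s.drop j := by
  rw [← PySem.Chars.isIn_iff_infix, ← PySem.Chars.exists_prefix_drop_iff_isIn]

-- find inside a prefix, found case: the global first occurrence, if it fits, is the answer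
theorem pv_find_take_eq (u m : List Char) (e : Nat) (hm : m ≠ [])
    (h0 : 0 ≤ PySem.Chars.find u m)
    (h1 : PySem.Chars.find u m + m.length ≤ (e : Int)) :
    PySem.Chars.find (u.take e) m = PySem.Chars.find u m := by
  obtain ⟨hocc, hmin⟩ := PySem.Chars.find_spec (s := u) (sub := m) h0
  set i : Nat := (PySem.Chars.find u m).toNat with hi
  have hie : i + m.length ≤ e := by omega
  have hocc' : m <+: (u.take e).drop i := (pv_prefix_take_drop u m e i hm).mpr ⟨hocc, hie⟩
  have hne : PySem.Chars.find (u.take e) m ≠ -1 := by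
    rw [PySem.Chars.find_ne_neg_one_iff, pv_infix_iff]; exact ⟨i, hocc'⟩
  have hr0 : 0 ≤ PySem.Chars.find (u.take e) m := by
    have := PySem.Chars.neg_one_le_find (u.take e) m; omega
  obtain ⟨rocc, rmin⟩ := PySem.Chars.find_spec (s := u.take e) (sub := m) hr0
  set r : Nat := (PySem.Chars.find (u.take e) m).toNat with hr
  have h2 : m <+: u.drop r := ((pv_prefix_take_drop u m e r hm).mp rocc).1
  have h3 : ¬ r < i := fun hlt => hmin r hlt h2
  have h4 : ¬ i < r := fun hlt => rmin i hlt hocc'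
  omega

-- find inside a prefix, absent case
theorem pv_find_take_neg (u m : List Char) (e : Nat) (hm : m ≠ [])
    (h : ¬ (0 ≤ PySem.Chars.find u m ∧ PySem.Chars.find u m + m.length ≤ (e : Int))) :
    PySem.Chars.find (u.take e) m = -1 := by
  rw [PySem.Chars.find_eq_neg_one_iff, pv_infix_iff]
  rintro ⟨j, hj⟩
  obtain ⟨hocc, hje⟩ := (pv_prefix_take_drop u m e j hm).mp hj
  have hne : PySem.Chars.find u m ≠ -1 := by
    rw [PySem.Chars.find_ne_neg_one_iff, pv_infix_iff]; exact ⟨j, hocc⟩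
  have h0 : 0 ≤ PySem.Chars.find u m := by
    have := PySem.Chars.neg_one_le_find u m; omega
  obtain ⟨_, hmin⟩ := PySem.Chars.find_spec (s := u) (sub := m) h0
  have hle : (PySem.Chars.find u m).toNat ≤ j := by
    by_contra hlt; exact hmin j (by omega) hocc
  exact h ⟨h0, by omega⟩

-- terminal shape of splitOnMax.go once the split budget is exhausted
theorem pv_go_zero (sep : List Char) (fuel : Nat) (l cur : List Char) (a : List Char) :
    (PySem.Chars.splitOnMax.go sep fuel 0 l cur [a]).head? = some a := by
  cases fuel <;> cases l <;> simp [PySem.Chars.splitOnMax.go]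

-- the first piece of a budget-1 split is everything before the first occurrence
theorem pv_go_one (sep : List Char) (hsep : sep ≠ []) :
    ∀ (fuel : Nat) (l cur : List Char) (j : Nat), l.length ≤ fuel →
    sep <+: l.drop j → (∀ j' < j, ¬ sep <+: l.drop j') →
    (PySem.Chars.splitOnMax.go sep fuel 1 l cur []).head? =
      some (cur.reverse ++ l.take j) := by
  intro fuel
  induction fuel with
  | zero =>
    intro l cur j hfl hj _
    have : l = [] := List.length_eq_zero_iff.mp (Nat.le_zero.mp hfl)
    subst this
    simp at hj
    exact absurd hj hsep
  | succ n ih =>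
    intro l cur j hfl hj hmin
    cases l with
    | nil =>
      simp at hj
      exact absurd hj hsep
    | cons c rest =>
      by_cases hp : sep.isPrefixOf (c :: rest)
      · have hj0 : j = 0 := by
          by_contra h0
          exact hmin 0 (by omega) (by simpa using (List.isPrefixOf_iff_prefix.mp hp))
        subst hj0
        simp only [PySem.Chars.splitOnMax.go, hp, if_true, if_neg (by omega : ¬ (1:Nat) = 0)]
        simpa using pv_go_zero sep n (List.drop sep.length (c :: rest)) [] cur.reverse
      · have hj0 : j ≠ 0 := by
          intro h0; subst h0
          exact hp (List.isPrefixOf_iff_prefix.mpr (by simpa using hj))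
        obtain ⟨j', rfl⟩ : ∃ j', j = j' + 1 := ⟨j - 1, by omega⟩
        have := ih rest (c :: cur) j' (by simpa using Nat.lt_succ_iff.mp (by simpa using hfl))
          (by simpa using hj)
          (fun k hk => by simpa using hmin (k + 1) (by omega))
        simp only [PySem.Chars.splitOnMax.go, hp, Bool.false_eq_true, if_false,
          if_neg (by omega : ¬ (1:Nat) = 0)]
        rw [this]
        simp

theorem pv_split_head (s sep : List Char) (hsep : sep ≠ [])
    (h : 0 ≤ PySem.Chars.find s sep) :
    (PySem.Chars.splitOnMax s sep 1).head? =
      some (s.take (PySem.Chars.find s sep).toNat) := by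
  obtain ⟨hocc, hmin⟩ := PySem.Chars.find_spec (s := s) (sub := sep) h
  unfold PySem.Chars.splitOnMax
  rw [if_neg (by omega : ¬ (1:Int) < 0)]
  have := pv_go_one sep hsep (s.length + 1) s [] (PySem.Chars.find s sep).toNat
    (by omega) hocc hmin
  simpa using this

-- the coupled fold invariant: A's shrinking string is always `u.take e` for B's cut index e
theorem pv_main (ms : List String) (hm : ∀ m ∈ ms, m.toList ≠ []) :
    ∀ (s : String) (e : Int) (u : String), 0 ≤ e → e ≤ (u.toList.length : Int) →
    s.toList = u.toList.take e.toNat →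
    ∃ e' : Int, 0 ≤ e' ∧ e' ≤ e ∧
      (ms.foldl (fun fu aka =>
        if PySem.Str.isIn aka fu = true then
          match PySem.Str.splitMax? fu aka 1 with
          | some (p :: _) => p
          | _ => ""
        else fu) s).toList = u.toList.take e'.toNat ∧
      (ms.map (fun m => (PySem.Str.find u m, PySem.Str.len m))).foldl
        (fun e iw => if iw.1 ≠ -1 ∧ iw.1 + iw.2 ≤ e then iw.1 else e) e = e' := by
  induction ms with
  | nil =>
    intro s e u he0 _ hs
    exact ⟨e, he0, le_refl e, by simpa using hs, rfl⟩
  | cons m rest ih =>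
    intro s e u he0 heu hs
    have hmne : m.toList ≠ [] := hm m (by simp)
    have hrest : ∀ m' ∈ rest, m'.toList ≠ [] := fun m' hm' => hm m' (by simp [hm'])
    have hlen1 : 0 < m.toList.length := List.length_pos_iff.mpr hmne
    have hcast : ((e.toNat : Nat) : Int) = e := Int.toNat_of_nonneg he0
    set i : Int := PySem.Chars.find u.toList m.toList with hidef
    have hin1 : -1 ≤ i := PySem.Chars.neg_one_le_find u.toList m.toList
    simp only [List.foldl_cons, List.map_cons]
    by_cases hc : 0 ≤ i ∧ i + m.toList.length ≤ e
    · -- the marker's first global occurrence fits inside the current prefix: both cut at i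
      have hft : PySem.Chars.find s.toList m.toList = i := by
        rw [hs]; exact pv_find_take_eq u.toList m.toList e.toNat hmne hc.1 (by omega)
      have hisin : PySem.Str.isIn m s = true := by
        rw [PySem.Str.isIn_eq, PySem.Chars.isIn_iff_infix,
          ← PySem.Chars.find_ne_neg_one_iff, hft]
        omega
      obtain ⟨x, t, hxt⟩ : ∃ x t, PySem.Chars.splitOnMax s.toList m.toList 1 = x :: t := by
        have hh := pv_split_head s.toList m.toList hmne (by rw [hft]; exact hc.1)
        rcases hq : PySem.Chars.splitOnMax s.toList m.toList 1 with _ | ⟨x, t⟩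
        · rw [hq] at hh; simp at hh
        · exact ⟨x, t, rfl⟩
      have hx : x = s.toList.take i.toNat := by
        have hh := pv_split_head s.toList m.toList hmne (by rw [hft]; exact hc.1)
        rw [hxt, hft] at hh
        simpa using hh
      have hsplit : PySem.Str.splitMax? s m 1 = some (String.ofList x :: t.map String.ofList) := by
        unfold PySem.Str.splitMax? PySem.Chars.splitMax?
        rw [if_neg (by simpa [List.isEmpty_iff] using hmne), hxt]
        simp
      have hstepA :
          (if PySem.Str.isIn m s = true then
            match PySem.Str.splitMax? s m 1 with
            | some (p :: _) => p
            | _ => ""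
          else s) = String.ofList x := by
        rw [if_pos hisin, hsplit]
      have hstepB :
          (if PySem.Str.find u m ≠ -1 ∧ PySem.Str.find u m + PySem.Str.len m ≤ e
            then PySem.Str.find u m else e) = i := by
        rw [PySem.Str.find_eq, PySem.Str.len_eq, ← hidef]
        rw [if_pos ⟨by omega, hc.2⟩]
      have hxu : (String.ofList x).toList = u.toList.take i.toNat := by
        rw [String.toList_ofList, hx, hs, List.take_take]
        congr 1
        omega
      obtain ⟨e', h1, h2, h3, h4⟩ := ih hrest (String.ofList x) i u hc.1
        (by have := PySem.Chars.find_le_length u.toList m.toList; omega) hxu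
      refine ⟨e', h1, by omega, ?_, ?_⟩
      · rw [hstepA]; exact h3
      · rw [hstepB]; exact h4
    · -- no fitting occurrence: neither side changes its state
      have hft : PySem.Chars.find s.toList m.toList = -1 := by
        rw [hs]
        exact pv_find_take_neg u.toList m.toList e.toNat hmne (by rw [← hidef]; omega)
      have hisin : ¬ PySem.Str.isIn m s = true := by
        rw [PySem.Str.isIn_eq, PySem.Chars.isIn_iff_infix, ← PySem.Chars.find_ne_neg_one_iff, hft]
        simp
      have hstepA :
          (if PySem.Str.isIn m s = true then
            match PySem.Str.splitMax? s m 1 with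
            | some (p :: _) => p
            | _ => ""
          else s) = s := by
        rw [if_neg hisin]
      have hstepB :
          (if PySem.Str.find u m ≠ -1 ∧ PySem.Str.find u m + PySem.Str.len m ≤ e
            then PySem.Str.find u m else e) = e := by
        rw [PySem.Str.find_eq, PySem.Str.len_eq, ← hidef]
        rw [if_neg]
        rintro ⟨hne, hle⟩
        exact hc ⟨by omega, hle⟩
      obtain ⟨e', h1, h2, h3, h4⟩ := ih hrest s e u he0 heu hs
      refine ⟨e', h1, h2, ?_, ?_⟩
      · rw [hstepA]; exact h3
      · rw [hstepB]; exact h4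

-- ===== VERDICT (by name: the statement is the Claim_ definition above) =====
set_option maxRecDepth 8192 in
theorem remove_aka_spec : Claim_equal_remove_aka := by
  intro fullname _
  unfold Spec_remove_aka remove_aka remove_aka_alt
  have hm : ∀ m ∈ akaMarkers, m.toList ≠ [] := by
    intro m hmm
    simp only [akaMarkers, List.mem_cons, List.not_mem_nil, or_false] at hmm
    rcases hmm with rfl|rfl|rfl|rfl|rfl|rfl|rfl|rfl|rfl|rfl|rfl|rfl|rfl|rfl|rfl|rfl|rfl|rfl|rfl|rfl|rfl|rfl|rfl|rfl|rfl|rfl|rfl <;> decide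
  set u := PySem.Str.upper fullname with hu
  obtain ⟨e', h1, h2, h3, h4⟩ := pv_main akaMarkers hm u (PySem.Str.len u) u
    (by rw [PySem.Str.len_eq]; positivity)
    (by rw [PySem.Str.len_eq])
    (by rw [PySem.Str.len_eq]; simp)
  rw [← String.toList_inj]
  rw [PySem.Str.toList_strip, PySem.Str.toList_strip, h3, h4]
  rw [PySem.Str.toList_slice,
    show PySem.Chars.slice u.toList none (some e') = PySem.List.slice u.toList none (some e') from rfl,
    PySem.List.slice_to u.toList h1]
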